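-- pv_equiv track=rewrite | github.com/raphlev/WTPyScripts | windchill/datamodel_extractor/extract_xml_transformer.py | merge_attributes_with_override
-- ===== SOURCE A (Python) =====
-- def merge_attributes_with_override(header_line,unique_attributes):
--     # Define which columns are boolean; indexes based on zero-based indexing after 'attributeName'
--     boolean_columns = [index for index, column_name in enumerate(header_line.split("~")) if column_name in {"required", "single", "upperCase"}]
--
--     # Group attributes by their identifying key (first 10 columns)
--     attribute_groups = {}
--     for attribute in unique_attributes:
--         attr_parts = attribute.split("~")
--         key = tuple(attr_parts[:10])  # Key based on first 10 fields Family,depth,classifType,parentClassifType,instantiable,displayClassifType,displayClassifTypeFR,description,descriptionTypeFR,attributeName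
--         if key not in attribute_groups:
--             attribute_groups[key] = []
--         attribute_groups[key].append(attr_parts)
--
--     merged_attributes = []
--     for key, group in attribute_groups.items():
--         merged_row = group[0]  # Start with the first row in the group
--         for attr_parts in group[1:]:
--             for i, value in enumerate(attr_parts):
--                 if i >= 10:  # Only merge attributes after the 10th column
--                     if i in boolean_columns:
--                         # Apply Merge Rule for boolean values: if any "Yes" value exists among duplicates, the merged result will also be "Yes"
--                         if value == "Yes" or merged_row[i] == "Yes":
--                             merged_row[i] = "Yes"
--                     else:
--                         # Apply Merge Rule for non-boolean values: the first non-empty value encountered is kept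
--                         if value:  # If the current value is non-empty, check if it should override
--                             merged_row[i] = value if merged_row[i] == "" else merged_row[i]
--         merged_attributes.append("~".join(merged_row))
--
--     return merged_attributes
-- ===== SOURCE B (Python) =====
-- def merge_attributes_with_override(header_line, unique_attributes):
--     # Group rows by key in one pass, then emit each merged row declaratively:
--     # every column is computed in closed form over the whole group (no in-place
--     # row mutation, no per-duplicate folding).
--     bool_cols = {i for i, name in enumerate(header_line.split("~"))
--                  if name in ("required", "single", "upperCase")}
--     groups = {}
--     for line in unique_attributes:
--         parts = line.split("~")
--         groups.setdefault(tuple(parts[:10]), []).append(parts)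
--     return ["~".join(_merged_value(bool_cols, g[1:], j, v) for j, v in enumerate(g[0]))
--             for g in groups.values()]
--
--
-- def _merged_value(bool_cols, dups, j, v):
--     # Closed-form value of column j: v is the first row's value there.
--     if j < 10:
--         return v
--     if j in bool_cols:
--         return "Yes" if v == "Yes" or any(j < len(r) and r[j] == "Yes" for r in dups) else v
--     if v:
--         return v
--     return next((r[j] for r in dups if j < len(r) and r[j]), "")
-- ===== Notes on version B (the rewrite author's own statement) =====
-- stated objective: simpler
-- what changed: B keeps a one-pass grouping by the 10-field key but replaces A's whole merge phase - iterating group[1:] and mutating the first row field by field with branch rules - by a declarative closed form per column: a boolean column is 'Yes' iff the first row or any duplicate has 'Yes' there, any other column is the first non-empty value in the group (computed with any()/next(), no row mutation, no incremental folding).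
import Mathlib
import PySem

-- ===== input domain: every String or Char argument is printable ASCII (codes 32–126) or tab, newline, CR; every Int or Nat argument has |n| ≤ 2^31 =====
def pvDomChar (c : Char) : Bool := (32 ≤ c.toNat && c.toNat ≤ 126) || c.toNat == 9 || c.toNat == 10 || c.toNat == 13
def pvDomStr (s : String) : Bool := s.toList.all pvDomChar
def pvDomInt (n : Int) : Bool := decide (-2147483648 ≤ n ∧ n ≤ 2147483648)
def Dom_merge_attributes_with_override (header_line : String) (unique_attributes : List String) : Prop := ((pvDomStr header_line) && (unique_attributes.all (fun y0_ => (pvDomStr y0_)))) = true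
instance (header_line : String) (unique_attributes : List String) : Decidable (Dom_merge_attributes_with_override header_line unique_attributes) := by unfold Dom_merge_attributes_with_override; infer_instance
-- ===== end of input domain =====

-- B groups rows once and then computes every merged column in closed form over its group,
-- instead of A's per-duplicate in-place row folding; same return value on all non-raising inputs.


-- ===== PORT A =====
-- s.split("~"): sep "~" ≠ "" so PySem.Str.split? is always `some`
def mawoSplit (s : String) : List String := (PySem.Str.split? s "~").getD []

-- attr_parts[:10] / r[:10]
def mawoKey (parts : List String) : List String := PySem.List.slice parts none (some 10)

-- indices of header columns named required/single/upperCase (A's boolean_columns list,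
-- also the comprehension underlying B's bool_cols set)
def mawo_boolcols (header_line : String) : List Nat :=
  (mawoSplit header_line).zipIdx.filterMap (fun p =>
    if p.1 = "required" ∨ p.1 = "single" ∨ p.1 = "upperCase" then some p.2 else none)

-- body of A's inner `for i, value in enumerate(attr_parts)` loop; p = (value, i).
-- Python raises IndexError when i ≥ len(merged_row) and the branch reads/writes merged_row[i];
-- those inputs are excluded by Pre_ below, here .getD/.set make the step a no-op there.
def mawo_stepA (bcols : List Nat) (r : List String) (p : String × Nat) : List String :=
  if 10 ≤ p.2 then
    if p.2 ∈ bcols then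
      (if p.1 = "Yes" ∨ r.getD p.2 "" = "Yes" then r.set p.2 "Yes" else r)
    else
      (if p.1 ≠ "" then (if r.getD p.2 "" = "" then r.set p.2 p.1 else r) else r)
  else r

def mawo_mergeRow (bcols : List Nat) (merged parts : List String) : List String :=
  parts.zipIdx.foldl (mawo_stepA bcols) merged

-- merged_row = group[0]; for attr_parts in group[1:]: …  ([] is unreachable: stored groups are nonempty)
def mawo_mergeGroup (bcols : List Nat) (g : List (List String)) : List String :=
  match g with
  | [] => []
  | first :: rest => rest.foldl (mawo_mergeRow bcols) first

-- the grouping loop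
def mawo_groups (ua : List String) : PySem.Dict (List String) (List (List String)) :=
  ua.foldl (fun d attr =>
    let attr_parts := mawoSplit attr
    let key := mawoKey attr_parts
    match d.get? key with
    | none => d.insert key [attr_parts]
    | some g => d.insert key (g ++ [attr_parts])) PySem.Dict.empty

def merge_attributes_with_override (header_line : String) (unique_attributes : List String) : List String :=
  let bcols := mawo_boolcols header_line
  (mawo_groups unique_attributes).items.foldl
    (fun acc kg => acc ++ [PySem.Str.join "~" (mawo_mergeGroup bcols kg.2)]) []

-- ===== PORT B =====
-- bool_cols = {…}: set built from the same comprehension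
def mawoB_bset (header_line : String) : PySem.Set Nat :=
  PySem.Set.ofList (mawo_boolcols header_line)

-- _merged_value(bool_cols, dups, j, v); inside, j < len(r) guards every r[j], so .getD is exact
def mawoB_colval (bset : PySem.Set Nat) (dups : List (List String)) (j : Nat) (v : String) : String :=
  if j < 10 then v
  else if j ∈ bset then
    (if v = "Yes" ∨ dups.any (fun r => decide (j < r.length) && (r.getD j "" == "Yes")) = true
     then "Yes" else v)
  else if v ≠ "" then v
  else ((dups.find? (fun r => decide (j < r.length) && (r.getD j "" != ""))).map
          (fun r => r.getD j "")).getD ""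

-- "~".join(_merged_value(bool_cols, g[1:], j, v) for j, v in enumerate(g[0])); the `match`
-- is g[0]/g[1:] (a stored group is never empty)
def mawoB_mergedRow (bset : PySem.Set Nat) (g : List (List String)) : List String :=
  match g with
  | [] => []
  | first :: dups => first.zipIdx.map (fun p => mawoB_colval bset dups p.2 p.1)

-- groups.setdefault(tuple(parts[:10]), []).append(parts)
def mawoB_groups (ua : List String) : PySem.Dict (List String) (List (List String)) :=
  ua.foldl (fun d line =>
    let parts := mawoSplit line
    d.insert (mawoKey parts) (d.getD (mawoKey parts) [] ++ [parts])) PySem.Dict.empty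

def merge_attributes_with_override_alt (header_line : String) (unique_attributes : List String) : List String :=
  (mawoB_groups unique_attributes).values.map
    (fun g => PySem.Str.join "~" (mawoB_mergedRow (mawoB_bset header_line) g))

-- ===== PRECONDITION & SPEC =====
-- Pre_ excludes exactly the inputs on which A raises IndexError: a row whose key duplicates an
-- earlier row's key, is longer than the first row of its group, and has an extra field (index ≥ 10)
-- that is non-empty or lies in a boolean column.
def Pre_merge_attributes_with_override (header_line : String) (unique_attributes : List String) : Prop :=
  ∀ a ∈ unique_attributes, ∀ i < (mawoSplit a).length,
    10 ≤ i →
    (mawoSplit ((unique_attributes.find? (fun x => mawoKey (mawoSplit x) == mawoKey (mawoSplit a))).getD a)).length ≤ i →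
    ((mawoSplit a).getD i "" = "" ∧ i ∉ mawo_boolcols header_line)

instance (header_line : String) (unique_attributes : List String) : Decidable (Pre_merge_attributes_with_override header_line unique_attributes) := by unfold Pre_merge_attributes_with_override; infer_instance

def pvWitness_merge_attributes_with_override : String × List String :=
  ("required~x~y", ["a~b~Yes", "a~b~No", "c"])

def Spec_merge_attributes_with_override (header_line : String) (unique_attributes : List String) (out : List String) : Prop := out = merge_attributes_with_override_alt header_line unique_attributes
instance (header_line : String) (unique_attributes : List String) (out : List String) : Decidable (Spec_merge_attributes_with_override header_line unique_attributes out) := by unfold Spec_merge_attributes_with_override; infer_instance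

-- ===== CLAIM (what is proved, stated in full; the proofs are below) =====
def Claim_equal_merge_attributes_with_override : Prop := ∀ (header_line : String) (unique_attributes : List String), Dom_merge_attributes_with_override header_line unique_attributes → Pre_merge_attributes_with_override header_line unique_attributes → Spec_merge_attributes_with_override header_line unique_attributes (merge_attributes_with_override header_line unique_attributes)

-- ===== LEMMAS AND PROOFS =====

-- the effect of one A-merge step at one column
def mawoColStep (bcols : List Nat) (j : Nat) (x : String) (o : Option String) : String :=
  match o with
  | none => x
  | some v =>
    if 10 ≤ j then
      if j ∈ bcols then (if v = "Yes" ∨ x = "Yes" then "Yes" else x)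
      else (if v ≠ "" ∧ x = "" then v else x)
    else x

lemma mawo_stepA_length (bcols : List Nat) (r : List String) (p : String × Nat) :
    (mawo_stepA bcols r p).length = r.length := by
  unfold mawo_stepA; split_ifs <;> simp

lemma mawo_mergeRow_length (bcols : List Nat) (m d : List String) :
    (mawo_mergeRow bcols m d).length = m.length := by
  unfold mawo_mergeRow
  generalize d.zipIdx = L
  induction L generalizing m with
  | nil => rfl
  | cons a L ih => simp only [List.foldl_cons]; rw [ih, mawo_stepA_length]

lemma mawo_mergeRow_snoc (bcols : List Nat) (m q : List String) (v : String) :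
    mawo_mergeRow bcols m (q ++ [v])
      = mawo_stepA bcols (mawo_mergeRow bcols m q) (v, q.length) := by
  unfold mawo_mergeRow
  rw [List.zipIdx_append, List.foldl_append]
  simp

lemma mawo_stepA_getD_ne (bcols : List Nat) (r : List String) (p : String × Nat) (j : Nat)
    (hne : p.2 ≠ j) :
    (mawo_stepA bcols r p).getD j "" = r.getD j "" := by
  unfold mawo_stepA
  split_ifs <;> simp [List.getD_eq_getElem?_getD, List.getElem?_set_ne hne]

lemma mawo_stepA_getD_self (bcols : List Nat) (r : List String) (v : String) (j : Nat)
    (hj : j < r.length) :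
    (mawo_stepA bcols r (v, j)).getD j "" = mawoColStep bcols j (r.getD j "") (some v) := by
  unfold mawo_stepA mawoColStep
  simp only []
  split_ifs with h1 h2 h3 h4 h5 h6 h7 <;>
    simp_all [List.getD_eq_getElem?_getD]

lemma mawo_mergeRow_getD (bcols : List Nat) (m d : List String) (j : Nat) (hj : j < m.length) :
    (mawo_mergeRow bcols m d).getD j "" = mawoColStep bcols j (m.getD j "") d[j]? := by
  induction d using List.reverseRecOn with
  | nil => simp [mawo_mergeRow, mawoColStep]
  | append_singleton q v ih =>
    rw [mawo_mergeRow_snoc]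
    by_cases hcase : j = q.length
    · have hnone : q[j]? = none := List.getElem?_eq_none (by omega)
      have hsome : (q ++ [v])[j]? = some v := by
        rw [hcase, List.getElem?_append_right (le_refl _)]; simp
      rw [← hcase,
        mawo_stepA_getD_self _ _ _ _ (by rw [mawo_mergeRow_length]; exact hj), ih, hnone, hsome]
      rfl
    · have heq : (q ++ [v])[j]? = q[j]? := by
        rcases Nat.lt_or_ge j q.length with h | h
        · rw [List.getElem?_append_left h]
        · rw [List.getElem?_eq_none (by simp; omega), List.getElem?_eq_none h]
      rw [mawo_stepA_getD_ne _ _ _ _ (by simpa using fun h => hcase h.symm), ih, heq]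

lemma mawo_groupfold_length (bcols : List Nat) (first : List String) (dups : List (List String)) :
    (dups.foldl (mawo_mergeRow bcols) first).length = first.length := by
  induction dups generalizing first with
  | nil => rfl
  | cons d dups ih => simp only [List.foldl_cons]; rw [ih, mawo_mergeRow_length]

lemma mawo_group_getD (bcols : List Nat) (first : List String) (dups : List (List String))
    (j : Nat) (hj : j < first.length) :
    (dups.foldl (mawo_mergeRow bcols) first).getD j ""
      = dups.foldl (fun x r => mawoColStep bcols j x r[j]?) (first.getD j "") := by
  induction dups generalizing first with
  | nil => rfl
  | cons d dups ih =>
    simp only [List.foldl_cons]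
    rw [ih _ (by rw [mawo_mergeRow_length]; exact hj), mawo_mergeRow_getD _ _ _ _ hj]

lemma mawo_colfold_low (bcols : List Nat) (j : Nat) (h : ¬ 10 ≤ j)
    (dups : List (List String)) (x0 : String) :
    dups.foldl (fun x r => mawoColStep bcols j x r[j]?) x0 = x0 := by
  induction dups generalizing x0 with
  | nil => rfl
  | cons d dups ih =>
    simp only [List.foldl_cons]
    have : mawoColStep bcols j x0 d[j]? = x0 := by
      unfold mawoColStep; cases d[j]? <;> simp [h]
    rw [this, ih]

lemma mawo_colfold_bool (bcols : List Nat) (j : Nat) (hj10 : 10 ≤ j) (hjb : j ∈ bcols)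
    (dups : List (List String)) (x0 : String) :
    dups.foldl (fun x r => mawoColStep bcols j x r[j]?) x0
      = if x0 = "Yes" ∨ dups.any (fun r => decide (j < r.length) && (r.getD j "" == "Yes")) = true
        then "Yes" else x0 := by
  induction dups generalizing x0 with
  | nil => simp
  | cons d dups ih =>
    simp only [List.foldl_cons, List.any_cons]
    rw [ih]
    by_cases hd : j < d.length
    · have hsome : d[j]? = some d[j] := List.getElem?_eq_getElem hd
      have hgd : d.getD j "" = d[j] := by rw [List.getD_eq_getElem?_getD, hsome]; rfl
      have hcs : mawoColStep bcols j x0 d[j]? = if d[j] = "Yes" ∨ x0 = "Yes" then "Yes" else x0 := by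
        unfold mawoColStep; rw [hsome]; simp [hj10, hjb]
      rw [hcs]
      by_cases hdy : d[j] = "Yes" <;> by_cases hx : x0 = "Yes" <;>
        simp [hdy, hx, hd]
    · have hnone : d[j]? = none := List.getElem?_eq_none (Nat.le_of_not_lt hd)
      have hcs : mawoColStep bcols j x0 d[j]? = x0 := by unfold mawoColStep; rw [hnone]
      rw [hcs]
      simp [hd]

lemma mawo_colfold_nonbool (bcols : List Nat) (j : Nat) (hj10 : 10 ≤ j) (hjb : j ∉ bcols)
    (dups : List (List String)) (x0 : String) :
    dups.foldl (fun x r => mawoColStep bcols j x r[j]?) x0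
      = if x0 ≠ "" then x0
        else ((dups.find? (fun r => decide (j < r.length) && (r.getD j "" != ""))).map
                (fun r => r.getD j "")).getD "" := by
  induction dups generalizing x0 with
  | nil => by_cases h : x0 = "" <;> simp [h]
  | cons d dups ih =>
    simp only [List.foldl_cons, List.find?_cons]
    by_cases hd : j < d.length
    · have hsome : d[j]? = some d[j] := List.getElem?_eq_getElem hd
      have hgd : d.getD j "" = d[j] := by rw [List.getD_eq_getElem?_getD, hsome]; rfl
      have hcs : mawoColStep bcols j x0 d[j]? = if d[j] ≠ "" ∧ x0 = "" then d[j] else x0 := by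
        unfold mawoColStep; rw [hsome]; simp [hj10, hjb]
      rw [hcs, ih]
      by_cases hdv : d[j] = ""
      · by_cases hx : x0 = "" <;> simp [hdv, hx, hd]
      · have hbne : (d[j] != "") = true := bne_iff_ne.mpr hdv
        by_cases hx : x0 = "" <;> simp [hdv, hx, hd, hbne]
    · have hnone : d[j]? = none := List.getElem?_eq_none (Nat.le_of_not_lt hd)
      have hcs : mawoColStep bcols j x0 d[j]? = x0 := by unfold mawoColStep; rw [hnone]
      rw [hcs, ih]
      simp [hd]

lemma mawo_mergeGroup_eq_mergedRow (header_line : String) (g : List (List String)) :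
    mawo_mergeGroup (mawo_boolcols header_line) g
      = mawoB_mergedRow (mawoB_bset header_line) g := by
  cases g with
  | nil => rfl
  | cons first dups =>
    simp only [mawo_mergeGroup, mawoB_mergedRow]
    refine List.ext_getElem ?_ ?_
    · rw [mawo_groupfold_length]; simp
    · intro j h1 h2
      have hjf : j < first.length := by
        rw [mawo_groupfold_length] at h1; exact h1
      have hL : (dups.foldl (mawo_mergeRow (mawo_boolcols header_line)) first)[j]
          = (dups.foldl (mawo_mergeRow (mawo_boolcols header_line)) first).getD j "" := by
        rw [List.getD_eq_getElem?_getD, List.getElem?_eq_getElem h1]; rfl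
      have hzip : j < (first.zipIdx).length := by simpa using hjf
      rw [hL, List.getElem_map, List.getElem_zipIdx]
      simp only [Nat.zero_add]
      rw [mawo_group_getD _ _ _ _ hjf]
      have hx0 : first.getD j "" = first[j] := by
        rw [List.getD_eq_getElem?_getD, List.getElem?_eq_getElem hjf]; rfl
      rw [hx0]
      unfold mawoB_colval mawoB_bset
      by_cases h10 : j < 10
      · rw [if_pos h10, mawo_colfold_low _ _ (by omega)]
      · rw [if_neg h10]
        by_cases hb : j ∈ mawo_boolcols header_line
        · rw [if_pos ((PySem.Set.mem_ofList _ _).mpr hb),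
            mawo_colfold_bool _ _ (by omega) hb]
        · rw [if_neg (fun hmem => hb ((PySem.Set.mem_ofList _ _).mp hmem)),
            mawo_colfold_nonbool _ _ (by omega) hb]

-- ===== VERDICT (by name: the statement is the Claim_ definition above) =====
theorem merge_attributes_with_override_spec : Claim_equal_merge_attributes_with_override := by
  intro header_line ua _ _
  unfold Spec_merge_attributes_with_override
  unfold merge_attributes_with_override merge_attributes_with_override_alt
  rw [PySem.List.foldl_append_singleton_eq_map, List.nil_append]
  unfold mawo_groups mawoB_groups
  have hgr : ∀ (l : List String) (d : PySem.Dict (List String) (List (List String))),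
      l.foldl (fun d attr =>
        let attr_parts := mawoSplit attr
        let key := mawoKey attr_parts
        match d.get? key with
        | none => d.insert key [attr_parts]
        | some g => d.insert key (g ++ [attr_parts])) d
      = l.foldl (fun d line =>
        let parts := mawoSplit line
        d.insert (mawoKey parts) (d.getD (mawoKey parts) [] ++ [parts])) d := by
    intro l
    induction l with
    | nil => intro d; rfl
    | cons a l ih =>
      intro d
      simp only [List.foldl_cons]
      rw [ih]
      congr 1
      cases hg : d.get? (mawoKey (mawoSplit a)) with
      | none => simp [PySem.Dict.getD_eq_get?_getD, hg]
      | some g => simp [PySem.Dict.getD_eq_get?_getD, hg]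
  rw [hgr]
  simp only [PySem.Dict.values, List.map_map]
  refine List.map_congr_left fun kg _ => ?_
  simp only [Function.comp]
  rw [mawo_mergeGroup_eq_mergedRow]
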